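-- pv_equiv track=rewrite | github.com/Andydiii/Othello-Reversi- | Othello.py | diagonal_line
-- ===== SOURCE A (Python) =====
-- def diagonal_line(board, row, col):
--   '''
--   Returns the list which includes two corresponding diagonal lines by
--   the given list board, natural number row and col, representing
--   the corresponding row and column in the board.
--
--   diagonal_line: (listof (listof Str)) Nat Nat -> (listof Str)
--   '''
--   x = []
--   x2 = []
--   for r in range(len(board)):
--     for c in range(len(board[r])):
--       if r == row and c == col:
--         x += [board[r][c]]
--         x2 += [board[r][c]]
--       elif (r - row) == (c - col):
--         x += [board[r][c]]
--       elif (r - row) == (col - c):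
--         x2 += [board[r][c]]
--   return [x] + [x2]
-- ===== SOURCE B (Python) =====
-- def diagonal_line(board, row, col):
--   x = []
--   x2 = []
--   for r in range(len(board)):
--     line = board[r]
--     c = col + (r - row)
--     if 0 <= c < len(line):
--       x.append(line[c])
--     c2 = col - (r - row)
--     if 0 <= c2 < len(line):
--       x2.append(line[c2])
--   return [x, x2]
-- ===== Notes on version B (the rewrite author's own statement) =====
-- stated objective: faster
-- what changed: B visits only the two diagonal cells of each row via the index formulas c = col + (r - row) and c = col - (r - row) with bounds checks, instead of scanning every cell of the board and classifying it.
import Mathlib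
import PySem

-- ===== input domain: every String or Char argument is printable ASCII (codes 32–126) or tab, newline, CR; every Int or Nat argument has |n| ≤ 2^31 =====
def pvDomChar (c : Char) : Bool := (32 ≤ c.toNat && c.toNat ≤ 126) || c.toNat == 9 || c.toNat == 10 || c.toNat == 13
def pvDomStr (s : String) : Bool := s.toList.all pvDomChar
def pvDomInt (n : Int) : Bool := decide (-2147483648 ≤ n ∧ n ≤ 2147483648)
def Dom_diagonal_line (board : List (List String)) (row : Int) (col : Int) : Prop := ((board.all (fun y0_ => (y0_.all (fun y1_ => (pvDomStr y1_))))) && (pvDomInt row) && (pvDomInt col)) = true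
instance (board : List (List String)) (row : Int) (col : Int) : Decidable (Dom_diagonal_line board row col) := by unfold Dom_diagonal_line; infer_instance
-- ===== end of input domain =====

-- B walks only the two diagonals via index formulas (O(rows)) instead of scanning every cell (O(rows*cols)); measurably faster on wide boards.

-- ===== PORT A =====
-- inner loop body of A: scan every cell c of row r, classify against the two diagonals
def dlCellA (row col : Int) (r : Nat) (line : List String) (st2 : List String × List String) (c : Nat) : List String × List String :=
  let v := line.getD c ""
  if (r : Int) = row ∧ (c : Int) = col then (st2.1 ++ [v], st2.2 ++ [v])
  else if (r : Int) - row = (c : Int) - col then (st2.1 ++ [v], st2.2)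
  else if (r : Int) - row = col - (c : Int) then (st2.1, st2.2 ++ [v])
  else st2

def diagonal_line (board : List (List String)) (row : Int) (col : Int) : List (List String) :=
  let p := (List.range board.length).foldl
    (fun st r =>
      let line := board.getD r []
      (List.range line.length).foldl (dlCellA row col r line) st)
    (([] : List String), ([] : List String))
  [p.1] ++ [p.2]

-- ===== PORT B =====
-- per-row body of B: compute the two diagonal columns directly and bounds-check them
def dlRowB (row col : Int) (st : List String × List String) (r : Nat) (line : List String) : List String × List String :=
  let c : Int := col + ((r : Int) - row)
  let st1 := if 0 ≤ c ∧ c < (line.length : Int) then (st.1 ++ [line.getD c.toNat ""], st.2) else st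
  let c2 : Int := col - ((r : Int) - row)
  if 0 ≤ c2 ∧ c2 < (line.length : Int) then (st1.1, st1.2 ++ [line.getD c2.toNat ""]) else st1

def diagonal_line_alt (board : List (List String)) (row : Int) (col : Int) : List (List String) :=
  let p := (List.range board.length).foldl
    (fun st r => dlRowB row col st r (board.getD r []))
    (([] : List String), ([] : List String))
  [p.1, p.2]

-- ===== PRECONDITION & SPEC =====
def Spec_diagonal_line (board : List (List String)) (row : Int) (col : Int) (out : List (List String)) : Prop := out = diagonal_line_alt board row col
instance (board : List (List String)) (row : Int) (col : Int) (out : List (List String)) : Decidable (Spec_diagonal_line board row col out) := by unfold Spec_diagonal_line; infer_instance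

-- ===== CLAIM (what is proved, stated in full; the proofs are below) =====
def Claim_equal_diagonal_line : Prop := ∀ (board : List (List String)) (row : Int) (col : Int), Dom_diagonal_line board row col → Spec_diagonal_line board row col (diagonal_line board row col)

-- ===== LEMMAS AND PROOFS =====

-- A's inner scan over the first n cells of a row appends exactly the (bounds-checked)
-- main-diagonal cell and anti-diagonal cell of that row.
lemma dlCellA_range (row col : Int) (r : Nat) (line : List String) (n : Nat) (x x2 : List String) :
    (List.range n).foldl (dlCellA row col r line) (x, x2) =
      (x ++ (if 0 ≤ col + ((r : Int) - row) ∧ col + ((r : Int) - row) < (n : Int)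
             then [line.getD (col + ((r : Int) - row)).toNat ""] else []),
       x2 ++ (if 0 ≤ col - ((r : Int) - row) ∧ col - ((r : Int) - row) < (n : Int)
             then [line.getD (col - ((r : Int) - row)).toNat ""] else [])) := by
  induction n with
  | zero => simp
  | succ n ih =>
    rw [List.range_succ, List.foldl_append, ih]
    simp only [List.foldl_cons, List.foldl_nil, dlCellA]
    split_ifs
    all_goals try (exfalso; omega)
    all_goals try rw [show (col + ((r : Int) - row)).toNat = n from by omega]
    all_goals try rw [show (col - ((r : Int) - row)).toNat = n from by omega]
    all_goals simp

-- A's whole inner loop over a row equals B's direct per-row step.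
lemma row_step_eq (row col : Int) (r : Nat) (line : List String) (st : List String × List String) :
    (List.range line.length).foldl (dlCellA row col r line) st = dlRowB row col st r line := by
  obtain ⟨x, x2⟩ := st
  rw [dlCellA_range]
  simp only [dlRowB]
  split_ifs <;> simp

-- ===== VERDICT (by name: the statement is the Claim_ definition above) =====
theorem diagonal_line_spec : Claim_equal_diagonal_line := by
  intro board row col _
  unfold Spec_diagonal_line diagonal_line diagonal_line_alt
  have : (fun (st : List String × List String) r =>
      (List.range (board.getD r []).length).foldl (dlCellA row col r (board.getD r [])) st)
      = (fun st r => dlRowB row col st r (board.getD r [])) := by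
    funext st r
    exact row_step_eq row col r (board.getD r []) st
  simp only [this]
  rfl
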